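/-
  SEGMENT .4 OF `vorbis_decode_packet_rest` (0x110c92–0x110e56 + 0x110e74–0x110e79, the `k` loop of one partition of a floor-1 channel;
  stb_vorbis_fixed.c 3252–3261) SPLIT AT THE FOUR JOINS INSIDE ONE ROUND OF THE LOOP: the assertions at the loop head and at the four
  new cut points, the claims of the five children, the composition `Seg4.of_parts` (pure logic: `ReachVia.trans` and an induction on
  the measure `9 − k`; no machine step), and THE FRAME LEMMA OF A ROUND (`Loop4.step'`, `Loop4.stackOnly'`) that every child uses
  to build its exit assertion.

      .4a  0x110d0a–0x110d56 + 0x110e31–0x110e56 + 0x110d06 + 0x110e74–0x110e79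
                                     the loop test; `k ≥ cdim`: `++j` → .3 (`At3 … (j + 1)`); `book = g->subclass_books[pclass][cval & csub]`,
                                     `cval >>= cbits`; `book < 0`: `finalY[offset++] = 0`, `++k` → the loop head (`At4K … (k + 1)`);
                                     otherwise → 0x110d5c (`At4b`)
      .4b  0x110d5c–0x110d8d + 0x110c92–0x110c9a
                                     `c = f->codebooks + book`; `if (f->valid_bits < 10) prep_huffman(f)` → 0x110d93 (`At4c`)
      .4c  0x110d93–0x110e2c + 0x110c9f–0x110caa
                                     DECODE_RAW, inline (the same shape as segment .3b's): `var = c->fast_huffman[f->acc & 1023]`;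
                                     `var ≥ 0`: `f->acc >>= n`, `f->valid_bits −= n`, negative → `valid_bits = 0`, `var = −1`;
                                     `var < 0`: `var = codebook_decode_scalar_raw(f, c)` → 0x110cad (`At4d`, `r12d = var`)
      .4d  0x110cad–0x110cde         `if (c->sparse) var = c->sorted_values[var]` (K4: the sentinel slot for `var = −1`) → 0x110ce2 (`At4e`)
      .4e  0x110ce2–0x110d06         `finalY[offset++] = temp`, `++k` → the loop head (`At4K … (k + 1)`)

  THE SHAPE OF THE CUT ASSERTIONS. `Loop4` is what holds during one round: everything of `At4` but the address, with the ghost `k`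
  (`r14 = k ≤ cdim`, `[rsp + 8] = offset = 2 + Σ_{j' < j} cdim[pcl[j']] + k`). `At4K` is `Loop4` at the loop head `cut7` (0x110d0a):
  `At4` is its instance `k = 0` (`At4K.of_at4`), and with `k = cdim` the exit arm establishes `At3 … (j + 1)`. The four inner
  assertions are `Loop4` + the address + `k < cdim` + the registers live at the cut.

  WHAT IS LIVE AT THE FOUR CUTS (read off c/vorbis_f.dis):
      0x110d5c  reads rbp (= f: `[rbp + 0xa8]` codebooks, `[rbp + 0x6e8]` valid_bits), bx (= book: `movsx rbx, bx`); r14d (= k) is carried to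
                0x110d06; r15d (cval) was stored to `[rsp]` at 0x110d4d and is reloaded at 0x110d17; r13 (= g) is reloaded from
                `[rsp + 0x18]` at 0x110d30; r12, rax, rcx, rsi, rdx are written before they are read.
      0x110d93  reads rbp (`[rbp + 0x6e4]` acc, `[rbp + 0x6e8]` valid_bits), rbx (= c: `[rbx + r12*2]` fast_huffman, `[rbx + 8]`
                codeword_lengths, `rsi` of the call); r15, r12, r13, rax, rcx are written before they are read; r14d carried.
      0x110cad  reads rbx (= c: `[rbx + 0x1b]` sparse, `[rbx + 0x838]` sorted_values), r12d (= var); r14d carried; rbp carried (`Loop4.rbp`).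
      0x110ce2  reads `[rsp + 8]` (offset), `[rsp + 0x20]` (finalY), r12w (= temp: ANY value is stored), r14d; rbx, r13, rax, rsi are
                written before they are read.
  THE STORES OF A ROUND: `[rsp]` (cval, 0x110d4d), `[rsp + 8]` (offset, 0x110d01 / 0x110e52) — both inside the window
  `[entry rsp − 3856, entry rsp − 3000 + 12)` of `Loop4.step'` —, `finalY[offset]` (0x110cfd / 0x110e4b: the block of channel `i`),
  `f->acc`, `f->valid_bits` (0x110df4, 0x110e10, 0x110e1c) and the footprints of prep_huffman and codebook_decode_scalar_raw (the bit
  reader's windows of `*f`, `Reader.winsBits`); `[rsp + 0x48] = j` is incremented on the exit arm only (0x110e79).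

  THE STACK ARGUMENTS. `Stable.arg_re` / `arg_left` are read in place at `[entry rsp + 8, entry rsp + 24)`; they are carried over the
  stores into `*f` and into the `finalY` block (arena blocks, which may begin at 800000H) because the two slots lie inside the stack
  region: `Args.args_top` (`entry rsp + 24 ≤ 800000H`), used inside `Loop4.step'`.
-/
import Vorbis.Spec.PacketRest
import Vorbis.Spec.PacketRestFrame
import Vorbis.Spec.Reader
import Vorbis.LabelsAt
import Asan.CheckWalk

open X86 X86.User Asan Vorbis Vorbis.Spec

set_option maxRecDepth 4000
set_option maxHeartbeats 4000000

namespace Vorbis.Spec.vorbis_decode_packet_rest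

/-! ### The assertions: the loop invariant and the four inner cut points -/

/-- **What holds during one round of the `k` loop** (lines 3252–3261), channel `i`, partition `j`, ghost `k`: STABLE ∧ `rbp = f` ∧
`r14d = k ≤ cdim` ∧ the spill slots of `At4` ∧ `offset = 2 + Σ_{j' < j} cdim[pcl[j']] + k`. `[rsp] = cval` is any `int`. It is `At4`
without the address and with the counter `k` instead of `0`. -/
structure Loop4 (u₀ : State) (others : List Obj) (frames : List (Nat × FrameLayout)) (len : Nat) (Ar : Arena)
    (stored room : Int) (mode : Nat) (ysz : Nat → Nat) (u : State) (ret : Word)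
    (i j k : Nat) (v : State) : Prop
    extends Stable u₀ others frames len Ar stored room mode ysz u ret (lsOf u) v where
  /-- `rbp = f` (`At4.rbp`; callee-saved across prep_huffman and codebook_decode_scalar_raw, never written in the segment) -/
  rbp : (v.reg .rbp).toNat = (fOf u)
  /-- `r14 = k`, the whole register (`At4.r14` for `k = 0`; `add r14d, 1` at 0x110d06 zero-extends) -/
  r14 : v.reg .r14 = UInt64.ofNat k
  /-- `[rsp + 0x18] = g`, the Floor1 record of channel `i` (`At4.g`; the slot is not written in the segment) -/
  g : IsFloor v.mem (fOf u) (slot64 u v 0x18)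
  /-- `[rsp + 0x48] = j` (incremented on the exit arm 0x110e79 only) -/
  slot_j : slot32 u v 0x48 = j
  /-- `j < g->partitions` -/
  j_lt : j < Floor1.partitions v.mem (slot64 u v 0x18)
  /-- `[rsp + 0x38] = pclass = g->partition_class_list[j]` -/
  slot_pclass : slot32 u v 0x38 = Floor1.partition_class_list v.mem (slot64 u v 0x18) j
  /-- `[rsp + 0x10] = cdim = g->class_dimensions[pclass]` (the loop bound read at 0x110d0a) -/
  slot_cdim : slot32 u v 0x10 = Floor1.class_dimensions v.mem (slot64 u v 0x18) (slot32 u v 0x38)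
  /-- the loop counter does not exceed the bound: `k ≤ cdim` -/
  k_le : k ≤ slot32 u v 0x10
  /-- `[rsp + 0x2c] = cbits = g->class_subclasses[pclass]` (the shift count of 0x110d4a) -/
  slot_cbits : slot32 u v 0x2c = Floor1.class_subclasses v.mem (slot64 u v 0x18) (slot32 u v 0x38)
  /-- `[rsp + 0x30] = csub = 2^cbits − 1` (the mask of 0x110d22) -/
  slot_csub : slot32 u v 0x30 = 2 ^ slot32 u v 0x2c - 1
  /-- `[rsp + 8] = offset = 2 + Σ_{j' < j} cdim[pcl[j']] + k`: one `finalY` entry is written per round -/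
  slot_offset : slot32 u v 0x8 = 2 + Floor1.dimSum v.mem (slot64 u v 0x18) j + k
  /-- `[rsp + 0x54] = i` -/
  slot_i : slot32 u v 0x54 = i
  /-- `i < f->channels` -/
  i_lt : (i : Int) < stb_vorbis.channels v.mem (fOf u)
  /-- `[rsp + 0x20] = finalY = f->finalY[i]` -/
  slot_finalY : slot64 u v 0x20 = stb_vorbis.finalY v.mem (fOf u) i
  /-- `[rsp + 0x58] = map` -/
  slot_map : slot64 u v 0x58 = mapOf v.mem (fOf u) (mOf u)

/-- **THE INVARIANT OF THE `k` LOOP at its head 0x110d0a (`cut7`)** (line 3252): `Loop4` at `cut7`. `At4` is the instance `k = 0`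
(`At4K.of_at4`); with `k = cdim` the exit arm 0x110e74 establishes `At3 … (j + 1)` (`Floor1.dimSum_succ`). Entry of child .4a, exit
of .4a (the `book < 0` arm) and of .4e. -/
structure At4K (u₀ : State) (others : List Obj) (frames : List (Nat × FrameLayout)) (len : Nat) (Ar : Arena)
    (stored room : Int) (mode : Nat) (ysz : Nat → Nat) (u : State) (ret : Word)
    (i j k : Nat) (v : State) : Prop
    extends Loop4 u₀ others frames len Ar stored room mode ysz u ret i j k v where
  /-- the loop head 0x110d0a (`mov eax, [rsp + 0x10]`) -/
  rip : v.rip = Vorbis.L.vorbis_decode_packet_rest.cut7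

/-- **Cut 0x110d5c (`at_110d5c`), the `book >= 0` arm** (line 3257, `lea rdi, [rbp + 0xa8]`), ghost `b` = the book number:
`Loop4` ∧ `k < cdim` ∧ `rbx = b` (the `uint16` loaded at 0x110d3f, zero-extended; bit 15 clear: `test bx, 0x8000 ; jne` not taken) ∧
`b < f->codebook_count` (FL6 on the masked index: `Floor1OK.book_range`). Entry of child .4b. -/
structure At4b (u₀ : State) (others : List Obj) (frames : List (Nat × FrameLayout)) (len : Nat) (Ar : Arena)
    (stored room : Int) (mode : Nat) (ysz : Nat → Nat) (u : State) (ret : Word)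
    (i j k b : Nat) (v : State) : Prop
    extends Loop4 u₀ others frames len Ar stored room mode ysz u ret i j k v where
  /-- the cut 0x110d5c -/
  rip : v.rip = Vorbis.L.vorbis_decode_packet_rest.at_110d5c
  /-- the loop test 0x110d11 was not taken: `k < cdim` -/
  k_lt : k < slot32 u v 0x10
  /-- `rbx = book`, the zero-extended `uint16` (`movzx ebx, word [r13 + rbx*2 + 2]`) -/
  rbx : v.reg .rbx = UInt64.ofNat b
  /-- bit 15 of the book is clear (`book >= 0` as an `int16`) -/
  b_lt : b < 32768
  /-- the book is a codebook of `f` (FL6) -/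
  book_lt : (b : Int) < stb_vorbis.codebook_count v.mem (fOf u)

/-- **Cut 0x110d93 (`at_110d93`), DECODE_RAW after the optional prep_huffman** (line 3258, `lea rdi, [rbp + 0x6e4]`; join of
0x110c9a and 0x110d8d): `Loop4` ∧ `k < cdim` ∧ `rbx = c = f->codebooks + b`, `b < f->codebook_count`. `Bits f` of the current memory
is part of `Stable.inv`. Entry of child .4c. -/
structure At4c (u₀ : State) (others : List Obj) (frames : List (Nat × FrameLayout)) (len : Nat) (Ar : Arena)
    (stored room : Int) (mode : Nat) (ysz : Nat → Nat) (u : State) (ret : Word)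
    (i j k b : Nat) (v : State) : Prop
    extends Loop4 u₀ others frames len Ar stored room mode ysz u ret i j k v where
  /-- the cut 0x110d93 -/
  rip : v.rip = Vorbis.L.vorbis_decode_packet_rest.at_110d93
  /-- `k < cdim` -/
  k_lt : k < slot32 u v 0x10
  /-- `rbx = c = f->codebooks + b` (0x110d68 … 0x110d73; callee-saved across prep_huffman) -/
  rbx : (v.reg .rbx).toNat = stb_vorbis.codebooks_at v.mem (fOf u) b
  /-- the book is a codebook of `f` -/
  book_lt : (b : Int) < stb_vorbis.codebook_count v.mem (fOf u)

/-- **Cut 0x110cad (`at_110cad`), after DECODE_RAW** (line 3258, `lea rdi, [rbx + 0x1b]`; join of 0x110caa, 0x110e16, 0x110e2c): as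
`At4c`, and `r12d = var` is a DECODE_RAW result of `c`: `var = −1 ∨ 0 ≤ var < N(c)` (from codebook_decode_scalar_raw's post, from K5
on the fast path, `−1` on the fast path's underflow arm). Entry of child .4d. -/
structure At4d (u₀ : State) (others : List Obj) (frames : List (Nat × FrameLayout)) (len : Nat) (Ar : Arena)
    (stored room : Int) (mode : Nat) (ysz : Nat → Nat) (u : State) (ret : Word)
    (i j k b : Nat) (v : State) : Prop
    extends Loop4 u₀ others frames len Ar stored room mode ysz u ret i j k v where
  /-- the cut 0x110cad -/
  rip : v.rip = Vorbis.L.vorbis_decode_packet_rest.at_110cad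
  /-- `k < cdim` -/
  k_lt : k < slot32 u v 0x10
  /-- `rbx = c = f->codebooks + b` (callee-saved across codebook_decode_scalar_raw) -/
  rbx : (v.reg .rbx).toNat = stb_vorbis.codebooks_at v.mem (fOf u) b
  /-- the book is a codebook of `f` -/
  book_lt : (b : Int) < stb_vorbis.codebook_count v.mem (fOf u)
  /-- `r12d = var`: `−1` or an index below `N(c)` (the low dword of r12, signed) -/
  var : DecodeRawResult v.mem (stb_vorbis.codebooks_at v.mem (fOf u) b) (argInt (v.reg .r12))

/-- **Cut 0x110ce2 (`at_110ce2`), before `finalY[offset++] = temp`** (line 3259, `mov eax, [rsp + 8]`; join of 0x110cba and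
0x110cde): `Loop4` ∧ `k < cdim`; `r12w = temp` is any value. Entry of child .4e. -/
structure At4e (u₀ : State) (others : List Obj) (frames : List (Nat × FrameLayout)) (len : Nat) (Ar : Arena)
    (stored room : Int) (mode : Nat) (ysz : Nat → Nat) (u : State) (ret : Word)
    (i j k : Nat) (v : State) : Prop
    extends Loop4 u₀ others frames len Ar stored room mode ysz u ret i j k v where
  /-- the cut 0x110ce2 -/
  rip : v.rip = Vorbis.L.vorbis_decode_packet_rest.at_110ce2
  /-- `k < cdim`: with FL8 (`Floor1OK.offset_lt`) the store stays inside the `finalY` block -/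
  k_lt : k < slot32 u v 0x10

/-! ### The claims of the five children -/

/-- **Segment .4a, 0x110d0a–0x110d56 + 0x110e31–0x110e56 + 0x110d06 + 0x110e74–0x110e79** (lines 3252–3256, 3261; 26 + 10 + 1 + 2
instructions; checks 0x110d3a, 0x110e46): the loop test; `k ≥ cdim` → `++j` → .3 (`At3 … (j + 1)`);
`book = g->subclass_books[pclass][cval & csub]`, `cval >>= cbits`; `book < 0` → `finalY[offset++] = 0`, `++k` → the loop head;
otherwise → `At4b`. -/
def Seg4a (Lay : Layout) (μ : Microarch) (u₀ : State) : Prop :=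
  ∀ (others : List Obj) (frames : List (Nat × FrameLayout)) (len : Nat) (Ar : Arena) (stored room : Int)
      (mode : Nat) (ysz : Nat → Nat) (u : State) (ret : Word) (i j k : Nat) (v : State),
    (At4K u₀ others frames len Ar stored room mode ysz u ret i j k v) →
    ReachVia Lay μ Vorbis.WayInv v (fun w => At3 u₀ others frames len Ar stored room mode ysz u ret i (j + 1) w ∨ At4K u₀ others frames len Ar stored room mode ysz u ret i j (k + 1) w ∨ ∃ b, At4b u₀ others frames len Ar stored room mode ysz u ret i j k b w)

/-- **Segment .4b, 0x110d5c–0x110d8d + 0x110c92–0x110c9a** (lines 3257–3258; 9 + 3 instructions; checks 0x110d63, 0x110d81; the call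
of prep_huffman): `c = f->codebooks + book`; `valid_bits ≤ 9` → prep_huffman → `At4c`. -/
def Seg4b (Lay : Layout) (μ : Microarch) (u₀ : State) : Prop :=
  ∀ (others : List Obj) (frames : List (Nat × FrameLayout)) (len : Nat) (Ar : Arena) (stored room : Int)
      (mode : Nat) (ysz : Nat → Nat) (u : State) (ret : Word) (i j k b : Nat) (v : State),
    (At4b u₀ others frames len Ar stored room mode ysz u ret i j k b v) →
    ReachVia Lay μ Vorbis.WayInv v (fun w => At4c u₀ others frames len Ar stored room mode ysz u ret i j k b w)

/-- **Segment .4c, 0x110d93–0x110e2c + 0x110c9f–0x110caa** (line 3258; 30 + 4 instructions; checks 0x110d9a, 0x110db8, 0x110dd3,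
0x110de3, 0x110e02; the call of codebook_decode_scalar_raw): the fast-huffman lookup; negative → codebook_decode_scalar_raw;
otherwise `acc >>= len`, `valid_bits -= len`, underflow → `valid_bits = 0`, `var = −1` → `At4d`. -/
def Seg4c (Lay : Layout) (μ : Microarch) (u₀ : State) : Prop :=
  ∀ (others : List Obj) (frames : List (Nat × FrameLayout)) (len : Nat) (Ar : Arena) (stored room : Int)
      (mode : Nat) (ysz : Nat → Nat) (u : State) (ret : Word) (i j k b : Nat) (v : State),
    (At4c u₀ others frames len Ar stored room mode ysz u ret i j k b v) →
    ReachVia Lay μ Vorbis.WayInv v (fun w => At4d u₀ others frames len Ar stored room mode ysz u ret i j k b w)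

/-- **Segment .4d, 0x110cad–0x110cde** (line 3258, the translation step of DECODE; 12 instructions; checks 0x110cb1, 0x110cc3,
0x110cd9; no store): `c->sparse` → `var = c->sorted_values[var]` (slot −1 for `var = −1`: K4) → `At4e`. -/
def Seg4d (Lay : Layout) (μ : Microarch) (u₀ : State) : Prop :=
  ∀ (others : List Obj) (frames : List (Nat × FrameLayout)) (len : Nat) (Ar : Arena) (stored room : Int)
      (mode : Nat) (ysz : Nat → Nat) (u : State) (ret : Word) (i j k b : Nat) (v : State),
    (At4d u₀ others frames len Ar stored room mode ysz u ret i j k b v) →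
    ReachVia Lay μ Vorbis.WayInv v (fun w => At4e u₀ others frames len Ar stored room mode ysz u ret i j k w)

/-- **Segment .4e, 0x110ce2–0x110d06** (line 3259; 10 instructions; check 0x110cf8): `finalY[offset++] = temp`, `++k` → the loop
head with `k + 1`. -/
def Seg4e (Lay : Layout) (μ : Microarch) (u₀ : State) : Prop :=
  ∀ (others : List Obj) (frames : List (Nat × FrameLayout)) (len : Nat) (Ar : Arena) (stored room : Int)
      (mode : Nat) (ysz : Nat → Nat) (u : State) (ret : Word) (i j k : Nat) (v : State),
    (At4e u₀ others frames len Ar stored room mode ysz u ret i j k v) →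
    ReachVia Lay μ Vorbis.WayInv v (fun w => At4K u₀ others frames len Ar stored room mode ysz u ret i j (k + 1) w)

/-! ### The composition -/

/-- The entry assertion of the segment is the loop invariant with `k = 0`. -/
theorem At4K.of_at4 {u₀ : State} {others : List Obj} {frames : List (Nat × FrameLayout)} {len : Nat} {Ar : Arena}
    {stored room : Int} {mode : Nat} {ysz : Nat → Nat} {u : State} {ret : Word} {i j : Nat} {v : State}
    (h : At4 u₀ others frames len Ar stored room mode ysz u ret i j v) :
    At4K u₀ others frames len Ar stored room mode ysz u ret i j 0 v where
  toStable := h.toStable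
  rip := h.rip
  rbp := h.rbp
  r14 := h.r14
  g := h.g
  slot_j := h.slot_j
  j_lt := h.j_lt
  slot_pclass := h.slot_pclass
  slot_cdim := h.slot_cdim
  k_le := Nat.zero_le _
  slot_cbits := h.slot_cbits
  slot_csub := h.slot_csub
  slot_offset := h.slot_offset
  slot_i := h.slot_i
  i_lt := h.i_lt
  slot_finalY := h.slot_finalY
  slot_map := h.slot_map

/-- **`cdim ≤ 8`** (FL6) during a round: the bound of the measure `cdim − k`. -/
theorem Loop4.cdim_le {u₀ : State} {others : List Obj} {frames : List (Nat × FrameLayout)} {len : Nat} {Ar : Arena}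
    {stored room : Int} {mode : Nat} {ysz : Nat → Nat} {u : State} {ret : Word} {i j k : Nat} {v : State}
    (h : Loop4 u₀ others frames len Ar stored room mode ysz u ret i j k v) : slot32 u v 0x10 ≤ 8 := by
  have hfl := (Real.VorbisOK.config h.toStable.toFrame.inv.fb.vorbis).floor.floor h.g
  have hc := hfl.FL6 j h.j_lt
  rw [h.slot_cdim, h.slot_pclass]
  exact hc.dim.2

/-- **THE LOOP, from one round**: if from every loop head `At4K … k` the machine reaches the next head `At4K … (k + 1)` or the
segment's exit `At3 … (j + 1)`, then segment .4 holds. Induction on the measure `9 − k` (`Loop4.k_le`, `Loop4.cdim_le`: `k ≤ cdim ≤ 8`). -/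
theorem Seg4.of_round {Lay : Layout} {μ : Microarch} {u₀ : State}
    (hround : ∀ (others : List Obj) (frames : List (Nat × FrameLayout)) (len : Nat) (Ar : Arena) (stored room : Int)
      (mode : Nat) (ysz : Nat → Nat) (u : State) (ret : Word) (i j k : Nat) (v : State),
      At4K u₀ others frames len Ar stored room mode ysz u ret i j k v →
      ReachVia Lay μ Vorbis.WayInv v (fun w => At4K u₀ others frames len Ar stored room mode ysz u ret i j (k + 1) w ∨
        At3 u₀ others frames len Ar stored room mode ysz u ret i (j + 1) w)) :
    Seg4 Lay μ u₀ := by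
  intro others frames len Ar stored room mode ysz u ret i j v hat
  have hloop : ∀ (n k : Nat), k + n = 9 → ∀ w, At4K u₀ others frames len Ar stored room mode ysz u ret i j k w →
      ReachVia Lay μ Vorbis.WayInv w (fun w' => At3 u₀ others frames len Ar stored room mode ysz u ret i (j + 1) w') := by
    intro n
    induction n with
    | zero =>
      intro k hk w hw
      have h1 := hw.k_le
      have h2 := hw.toLoop4.cdim_le
      omega
    | succ n ih =>
      intro k hk w hw
      refine (hround others frames len Ar stored room mode ysz u ret i j k w hw).trans ?_
      intro w' hw'
      rcases hw' with hk' | h3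
      · exact ih (k + 1) (by omega) w' hk'
      · exact ReachVia.done h3
  exact hloop 9 0 (by omega) v (At4K.of_at4 hat)

/-- **The composition of segment .4 from its five parts**: .4a leaves to .3 (`k = cdim`), returns to the loop head (`book < 0`) or
reaches `At4b`; .4b reaches `At4c`; .4c reaches `At4d`; .4d reaches `At4e`; .4e returns to the loop head with `k + 1`; the loop by
`Seg4.of_round`. Pure logic (`ReachVia.trans`). -/
theorem Seg4.of_parts {Lay : Layout} {μ : Microarch} {u₀ : State}
    (ha : Seg4a Lay μ u₀) (hb : Seg4b Lay μ u₀) (hc : Seg4c Lay μ u₀) (hd : Seg4d Lay μ u₀) (he : Seg4e Lay μ u₀) :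
    Seg4 Lay μ u₀ := by
  apply Seg4.of_round
  intro others frames len Ar stored room mode ysz u ret i j k v hk
  refine (ha others frames len Ar stored room mode ysz u ret i j k v hk).trans ?_
  intro w hw
  rcases hw with h3 | hk' | ⟨b, h4b⟩
  · exact ReachVia.done (Or.inr h3)
  · exact ReachVia.done (Or.inl hk')
  · refine (hb others frames len Ar stored room mode ysz u ret i j k b w h4b).trans ?_
    intro w1 h1
    refine (hc others frames len Ar stored room mode ysz u ret i j k b w1 h1).trans ?_
    intro w2 h2
    refine (hd others frames len Ar stored room mode ysz u ret i j k b w2 h2).trans ?_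
    intro w3 h3
    refine (he others frames len Ar stored room mode ysz u ret i j k w3 h3).trans ?_
    intro w4 h4
    exact ReachVia.done (Or.inl h4)

/-! ### The frame lemma of a round

`round4_inv` (the decode-time invariant over the footprint of a round), `cfgEq4_of_stores` (the configuration values the assertions
name in the CURRENT memory read the same), `Loop4.step'` (`Loop4` after a batch of stores of the round, with a new `k'`),
`Loop4.stackOnly'` (after stores below the steady stack pointer only: the return addresses of check calls). -/

/-- **THE DECODE-TIME INVARIANT OVER ONE ROUND OF THE `k` LOOP** (lines 3252–3261): everything the round (its two callees included)
stores lies in the stack window `[lo, hi)` (inside the stack region), in one of the bit reader's windows of `*f` (`Reader.winsBits`: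
`error`, `acc`, `valid_bits` and get8_packet_raw's fields), or in the `finalY` block of channel `c`. Given `Bits` of the new
memory (from the callee's post, or from `Bits.store_valid_bits` / `Bits.store_other` for the inline DECODE), `DecodeInv` holds again:
`DecodeInv.frame_stores` with `Env.eqOn` (no window meets the shadow), `ADO.frame_stores`, `M7Range.transfer`, `W1.transfer`. -/
theorem round4_inv {others : List Obj} {frames : List (Nat × FrameLayout)} {len : Nat} {Ar : Arena} {stored room : Int}
    {ysz : Nat → Nat} {mem mem' : Mem} {f lo hi c : Nat}
    (h : DecodeInv others frames len Ar stored room ysz mem f)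
    (hc : (c : Int) < stb_vorbis.channels mem f)
    (hlo : 0x700000 ≤ lo) (hhi : hi ≤ 0x800000)
    (hs : Mem.SameExcept [⟨lo, hi⟩, ⟨f + 48, f + 56⟩, ⟨f + 84, f + 96⟩, ⟨f + 136, f + 144⟩, ⟨f + 1484, f + 1749⟩,
      ⟨f + 1752, f + 1784⟩, ⟨stb_vorbis.finalY mem f c, stb_vorbis.finalY mem f c + ysz c⟩] mem mem')
    (hb : Bits (RunBlk Ar len) len mem' f) :
    DecodeInv others frames len Ar stored room ysz mem' f := by
  have hok := h.ok
  have hob := h.ob1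
  have hins := hok.inside _ hob
  simp only [vblock, voff] at hins
  obtain ⟨hyb, _⟩ := h.fy c hc
  have hyins := hok.inside _ hyb
  simp only [vblock] at hyins
  have hyobj := h.sep.bufobj _ (SampleBuf.finalY c hc (ysz c) hyb)
  simp only [vblock, voff] at hyobj
  -- every span is a decode-time store
  have hw : ∀ s, s ∈ [(⟨lo, hi⟩ : Span), ⟨f + 48, f + 56⟩, ⟨f + 84, f + 96⟩, ⟨f + 136, f + 144⟩, ⟨f + 1484, f + 1749⟩,
      ⟨f + 1752, f + 1784⟩, ⟨stb_vorbis.finalY mem f c, stb_vorbis.finalY mem f c + ysz c⟩] →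
      StoreOK (RunBlk Ar len) mem f s := by
    intro s hsp
    simp only [List.mem_cons, List.mem_nil_iff, or_false] at hsp
    rcases hsp with rfl | rfl | rfl | rfl | rfl | rfl | rfl
    · apply StoreOK.off
      intro B hB
      have := h.offStack B hB
      simp only []
      omega
    · exact StoreOK.hole (InHole.of_field f 48 8 (by omega))
    · exact StoreOK.hole (InHole.of_field f 84 12 (by omega))
    · exact StoreOK.hole (InHole.of_field f 136 8 (by omega))
    · exact StoreOK.hole (InHole.of_field f 1484 265 (by omega))
    · exact StoreOK.hole (InHole.of_field f 1752 32 (by omega))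
    · exact StoreOK.buffer _ (SampleBuf.finalY c hc (ysz c) hyb) (Nat.le_refl _) (Nat.le_refl _)
  -- where the spans are not: the shadow, the arena fields, the fields W1 and M7 read
  have hmiss : ∀ s, s ∈ [(⟨lo, hi⟩ : Span), ⟨f + 48, f + 56⟩, ⟨f + 84, f + 96⟩, ⟨f + 136, f + 144⟩, ⟨f + 1484, f + 1749⟩,
      ⟨f + 1752, f + 1784⟩, ⟨stb_vorbis.finalY mem f c, stb_vorbis.finalY mem f c + ysz c⟩] →
      s.hi ≤ 0xC00000 ∧ (s.hi ≤ f ∨ f + 1808 ≤ s.lo ∨ (f + 48 ≤ s.lo ∧ s.hi ≤ f + 56) ∨ (f + 84 ≤ s.lo ∧ s.hi ≤ f + 96) ∨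
        (f + 136 ≤ s.lo ∧ s.hi ≤ f + 144) ∨ (f + 1484 ≤ s.lo ∧ s.hi ≤ f + 1749) ∨ (f + 1752 ≤ s.lo ∧ s.hi ≤ f + 1784)) := by
    intro s hsp
    have hst := h.objOff
    simp only [voff] at hst
    simp only [List.mem_cons, List.mem_nil_iff, or_false] at hsp
    rcases hsp with rfl | rfl | rfl | rfl | rfl | rfl | rfl <;> simp only [] <;> omega
  have henv : Env (RunBlk Ar len) (Asan.Live (stackObjs frames ++ others)) mem' := by
    apply h.fb.env.eqOn
    apply hs.eqOn
    intro w hw'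
    have := (hmiss w hw').1
    omega
  have hado : ADO Ar others mem' f := by
    apply h.fb.ado.frame_stores hs (by simp only [voff]; omega)
    · intro s hsp
      have := (hmiss s hsp).2
      omega
    · intro s hsp
      have := (hmiss s hsp).2
      omega
  have h7 : Mdct.M7Range mem' f := by
    apply h.fb.vorbis.buffers.M7.transfer
    apply ObjEq.of_sameExcept hs
    · intro w hw'
      simp only [Mdct.M7Range.wins, List.mem_cons, List.mem_nil_iff, or_false] at hw'
      rcases hw' with rfl | rfl <;> simp only [] <;> omega
    · intro w hw' s hsp
      have := (hmiss s hsp).2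
      simp only [Mdct.M7Range.wins, List.mem_cons, List.mem_nil_iff, or_false] at hw'
      rcases hw' with rfl | rfl <;> simp only [] <;> omega
  have hw1 : W1 mem' f := by
    apply h.fb.vorbis.w1.transfer
    apply ObjEq.of_sameExcept hs
    · intro w hw'
      simp only [W1.wins, List.mem_cons, List.mem_nil_iff, or_false] at hw'
      rcases hw' with rfl | rfl <;> simp only [] <;> omega
    · intro w hw' s hsp
      have := (hmiss s hsp).2
      simp only [W1.wins, List.mem_cons, List.mem_nil_iff, or_false] at hw'
      rcases hw' with rfl | rfl <;> simp only [] <;> omega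
  exact h.frame_stores hs hw henv hado (fun _ => hb) (fun _ => h7) (fun _ => hw1)

/-- **What of the configuration a round needs to read the same in the new memory** `mem'` (after a batch of decode-time stores), for
the floor `g` and the channel `i`: the values that `Loop4` and the exit assertions name in the CURRENT memory. -/
structure CfgEq4 (mem mem' : Mem) (f mode g i : Nat) : Prop where
  channels : stb_vorbis.channels mem' f = stb_vorbis.channels mem f
  finalY : stb_vorbis.finalY mem' f i = stb_vorbis.finalY mem f i
  nOf : nOf mem' f (stb_vorbis.mode_config_at f mode) = nOf mem f (stb_vorbis.mode_config_at f mode)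
  mapOf : mapOf mem' f (stb_vorbis.mode_config_at f mode) = mapOf mem f (stb_vorbis.mode_config_at f mode)
  isFloor : IsFloor mem' f g
  floor : (Block.mk g Off.sizeof.Floor).Kept mem mem'
  codebook_count : stb_vorbis.codebook_count mem' f = stb_vorbis.codebook_count mem f
  codebooks : stb_vorbis.codebooks mem' f = stb_vorbis.codebooks mem f

/-- **The configuration reads the same over a batch of decode-time stores** (`StoreOK.decodeSame`, `StoreOK.reads_kept`,
`ConfigOK.buffers_eq`, `FloorShape.elem_kept`): the values the assertions of the round name in the CURRENT memory. -/
theorem cfgEq4_of_stores {others : List Obj} {frames : List (Nat × FrameLayout)} {len : Nat} {Ar : Arena} {stored room : Int}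
    {ysz : Nat → Nat} {mem mem' : Mem} {f mode g i : Nat} {spans : List Span}
    (h : DecodeInv others frames len Ar stored room ysz mem f)
    (hi : (i : Int) < stb_vorbis.channels mem f) (hg : IsFloor mem f g)
    (hmode : (mode : Int) < stb_vorbis.mode_count mem f)
    (hs : Mem.SameExcept spans mem mem') (hw : ∀ s, s ∈ spans → StoreOK (RunBlk Ar len) mem f s) :
    CfgEq4 mem mem' f mode g i := by
  have hcfg := h.config
  have hok := h.ok
  have hd : DecodeSame f mem mem' := StoreOK.decodeSame hok h.ob1 h.sep hs hw
  have he : ObjEq ConfigOK.wins mem f mem' f := hd.sub ConfigOK.wins_decode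
  have hk := StoreOK.reads_kept hcfg hok h.sep hs hw
  have hfk := hk _ ConfigOK.Reads.floor
  obtain ⟨ech, _, eptr⟩ := ConfigOK.buffers_eq he hcfg.header.HD1.2
  have hfl : FloorHdrEq mem f mem' f := FloorHdrEq.of_objEq (he.sub (by decide))
  have hmd := hcfg.mode.MD1
  have e0 : stb_vorbis.blocksize_0 mem' f = stb_vorbis.blocksize_0 mem f := by
    simp only [vacc, voff]
    exact he.i32 152 (by decide)
  have e1 : stb_vorbis.blocksize_1 mem' f = stb_vorbis.blocksize_1 mem f := by
    simp only [vacc, voff]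
    exact he.i32 156 (by decide)
  refine ⟨ech, (eptr i hi).2.2, ?_, ?_, ?_, hcfg.floor.toFloorShape.elem_kept hg hfk, ?_, ?_⟩
  · unfold vorbis_decode_packet_rest.nOf
    have eb : Mode.blockflag mem' (stb_vorbis.mode_config_at f mode) = Mode.blockflag mem (stb_vorbis.mode_config_at f mode) := by
      simp only [vacc, voff]
      exact he.u8_at (484 + 6 * mode) (InWins.of_mem (144, 1000) (by decide) (by simp only []; omega) (by simp only []; omega))
        (by omega) (by omega)
    rw [eb]
    exact bsize_congr e0 e1 _
  · unfold vorbis_decode_packet_rest.mapOf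
    have eb : Mode.mapping mem' (stb_vorbis.mode_config_at f mode) = Mode.mapping mem (stb_vorbis.mode_config_at f mode) := by
      simp only [vacc, voff]
      exact he.u8_at (484 + 6 * mode + 1) (InWins.of_mem (144, 1000) (by decide) (by simp only []; omega) (by simp only []; omega))
        (by omega) (by omega)
    rw [eb]
    simp only [vacc, voff]
    rw [he.u64 472 (by decide)]
  · exact FloorShape.isFloor_frame hfl hg
  · simp only [vacc, voff]
    exact he.i32 160 (by decide)
  · simp only [vacc, voff]
    exact he.u64 168 (by decide)


/-- A read in the stack region above every stack window of a footprint whose other windows lie off the stack region. -/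
theorem stack_keep4 {ws : List Span} {m m' : Mem} (hs : Mem.SameExcept ws m m') (lo : Nat)
    (hws : ∀ w, w ∈ ws → w.hi ≤ lo ∨ 0x800000 ≤ w.lo) (a : Word) (n : Nat) (h1 : lo ≤ a.toNat)
    (h2 : a.toNat + n ≤ 0x800000) : m'.readLE a n = m.readLE a n := by
  apply hs.readLE a n (by omega)
  intro w hw
  have := hws w hw
  omega

/-- **`Loop4` AFTER A BATCH OF STORES OF THE ROUND** (the one lemma behind every exit assertion of the sub-segments): the stores lie
below the scratch slot `[rsp + 0xc]` of the own frame, in the bit reader's windows of `*f`, or in the `finalY` block of channel `i`;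
`Bits` of the new memory is given; the slot `[rsp + 8]` holds the offset for the new `k'`. Every other slot, the saved registers, the
stack arguments read the same (`stack_keep4`), the configuration values follow (`cfgEq4_of_stores`), `DecodeInv` by `round4_inv`.
`hargs_in` — the stack arguments lie inside the stack region — is `Args.args_top` of the function's precondition. -/
theorem Loop4.step' {u₀ : State} {others : List Obj} {frames : List (Nat × FrameLayout)} {len : Nat} {Ar : Arena}
    {stored room : Int} {mode : Nat} {ysz : Nat → Nat} {e : State} {ret : Word} {i j k k' : Nat} {v s : State}
    (h : Loop4 u₀ others frames len Ar stored room mode ysz e ret i j k v)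
    (he_room : 0x700000 + 3856 ≤ (e.reg .rsp).toNat) (he_top : (e.reg .rsp).toNat + 8 ≤ 0x800000)
    (hrsp : s.reg .rsp = spOf e) (hcode : Vorbis.CodeOK u₀ s.mem) (habi : abiInv s)
    (hrbp : (s.reg .rbp).toNat = fOf e) (hr14 : s.reg .r14 = UInt64.ofNat k') (hk' : k' ≤ slot32 e v 0x10)
    (hs : Mem.SameExcept [⟨(e.reg .rsp).toNat - 3856, (e.reg .rsp).toNat - 3000 + 12⟩,
      ⟨fOf e + 48, fOf e + 56⟩, ⟨fOf e + 84, fOf e + 96⟩, ⟨fOf e + 136, fOf e + 144⟩, ⟨fOf e + 1484, fOf e + 1749⟩,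
      ⟨fOf e + 1752, fOf e + 1784⟩,
      ⟨stb_vorbis.finalY v.mem (fOf e) i, stb_vorbis.finalY v.mem (fOf e) i + ysz i⟩] v.mem s.mem)
    (hoff : slot32 e s 0x8 = 2 + Floor1.dimSum v.mem (slot64 e v 0x18) j + k')
    (hb : Bits (RunBlk Ar len) len s.mem (fOf e)) :
    Loop4 u₀ others frames len Ar stored room mode ysz e ret i j k' s ∧
      stb_vorbis.codebooks s.mem (fOf e) = stb_vorbis.codebooks v.mem (fOf e) ∧
      stb_vorbis.codebook_count s.mem (fOf e) = stb_vorbis.codebook_count v.mem (fOf e) ∧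
      slot32 e s 0x10 = slot32 e v 0x10 := by
  obtain ⟨hsh, hinv0, hargs⟩ := h.pre
  have hargs_in : (e.reg .rsp).toNat + 24 ≤ 0x800000 := hargs.args_top
  have hinv := h.inv
  have hi := h.i_lt
  -- the round's footprint as ONE stack window, for the invariant
  have hs1 : Mem.SameExcept [⟨(e.reg .rsp).toNat - 3856, (e.reg .rsp).toNat - 3000 + 12⟩,
      ⟨fOf e + 48, fOf e + 56⟩, ⟨fOf e + 84, fOf e + 96⟩, ⟨fOf e + 136, fOf e + 144⟩, ⟨fOf e + 1484, fOf e + 1749⟩,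
      ⟨fOf e + 1752, fOf e + 1784⟩,
      ⟨stb_vorbis.finalY v.mem (fOf e) i, stb_vorbis.finalY v.mem (fOf e) i + ysz i⟩] v.mem s.mem := hs
  have hinv' := round4_inv hinv hi (by omega) (by omega) hs1 hb
  have hcfg0 := hinv.config
  -- every span is a decode-time store; the configuration reads the same
  have hok := hinv.ok
  have hyb := (hinv.fy i hi).1
  have hyoff := hinv.offStack _ hyb
  simp only [] at hyoff
  have hfoff := hinv.objOff
  simp only [voff] at hfoff
  -- the configuration at the loop head reads as at the function's entry (the carried footprint)
  have hd0 : DecodeSame (fOf e) e.mem v.mem :=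
    StoreOK.decodeSame hinv0.ok hinv0.ob1 hinv0.sep h.same (fun w hw => footprint_storeOK h.pre he_room w hw)
  have he0 : ObjEq ConfigOK.wins e.mem (fOf e) v.mem (fOf e) := hd0.sub ConfigOK.wins_decode
  obtain ⟨ech0, _, eptr0⟩ := ConfigOK.buffers_eq he0 hinv0.config.header.HD1.2
  have hi0 : (i : Int) < stb_vorbis.channels e.mem (fOf e) := by
    rw [← ech0]
    exact hi
  have ey0 : stb_vorbis.finalY v.mem (fOf e) i = stb_vorbis.finalY e.mem (fOf e) i := (eptr0 i hi0).2.2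
  have hmode : (mode : Int) < stb_vorbis.mode_count v.mem (fOf e) := by
    have e1 : stb_vorbis.mode_count v.mem (fOf e) = stb_vorbis.mode_count e.mem (fOf e) := by
      simp only [vacc, voff]
      exact he0.i32 480 (by decide)
    rw [e1]
    exact hargs.mode_lt
  have hw : ∀ w, w ∈ [(⟨(e.reg .rsp).toNat - 3856, (e.reg .rsp).toNat - 3000 + 12⟩ : Span),
      ⟨fOf e + 48, fOf e + 56⟩, ⟨fOf e + 84, fOf e + 96⟩, ⟨fOf e + 136, fOf e + 144⟩, ⟨fOf e + 1484, fOf e + 1749⟩,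
      ⟨fOf e + 1752, fOf e + 1784⟩,
      ⟨stb_vorbis.finalY v.mem (fOf e) i, stb_vorbis.finalY v.mem (fOf e) i + ysz i⟩] →
      StoreOK (RunBlk Ar len) v.mem (fOf e) w := by
    intro w hsp
    simp only [List.mem_cons, List.mem_nil_iff, or_false] at hsp
    rcases hsp with rfl | rfl | rfl | rfl | rfl | rfl | rfl
    · apply StoreOK.off
      intro B hB
      have := hinv.offStack B hB
      simp only []
      omega
    · exact StoreOK.hole (InHole.of_field _ 48 8 (by omega))
    · exact StoreOK.hole (InHole.of_field _ 84 12 (by omega))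
    · exact StoreOK.hole (InHole.of_field _ 136 8 (by omega))
    · exact StoreOK.hole (InHole.of_field _ 1484 265 (by omega))
    · exact StoreOK.hole (InHole.of_field _ 1752 32 (by omega))
    · exact StoreOK.buffer _ (SampleBuf.finalY i hi (ysz i) hyb) (Nat.le_refl _) (Nat.le_refl _)
  have hcf := cfgEq4_of_stores (mode := mode) hinv hi h.g hmode hs hw
  -- the stack above the two scratch slots reads the same
  have hws : ∀ w, w ∈ [(⟨(e.reg .rsp).toNat - 3856, (e.reg .rsp).toNat - 3000 + 12⟩ : Span),
      ⟨fOf e + 48, fOf e + 56⟩, ⟨fOf e + 84, fOf e + 96⟩, ⟨fOf e + 136, fOf e + 144⟩, ⟨fOf e + 1484, fOf e + 1749⟩,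
      ⟨fOf e + 1752, fOf e + 1784⟩,
      ⟨stb_vorbis.finalY v.mem (fOf e) i, stb_vorbis.finalY v.mem (fOf e) i + ysz i⟩] →
      w.hi ≤ (e.reg .rsp).toNat - 3000 + 12 ∨ 0x800000 ≤ w.lo := by
    intro w hsp
    simp only [List.mem_cons, List.mem_nil_iff, or_false] at hsp
    rcases hsp with rfl | rfl | rfl | rfl | rfl | rfl | rfl <;> simp only [] <;> omega
  have keep : ∀ (a : Word) (n : Nat), (e.reg .rsp).toNat - 3000 + 12 ≤ a.toNat → a.toNat + n ≤ 0x800000 →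
      s.mem.readLE a n = v.mem.readLE a n :=
    fun a n h1 h2 => stack_keep4 hs _ hws a n h1 h2
  have hm : mOf e = stb_vorbis.mode_config_at (fOf e) mode := hargs.m_eq
  have eg : slot64 e s 0x18 = slot64 e v 0x18 := keep _ 8 (by u_omega) (by u_omega)
  have epc : slot32 e s 0x38 = slot32 e v 0x38 := keep _ 4 (by u_omega) (by u_omega)
  have ecd : slot32 e s 0x10 = slot32 e v 0x10 := keep _ 4 (by u_omega) (by u_omega)
  have ecb : slot32 e s 0x2c = slot32 e v 0x2c := keep _ 4 (by u_omega) (by u_omega)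
  have hfk := hcf.floor
  have hpl := Floor1.partition_class_list_lt v.mem (slot64 e v 0x18) j
  have hj256 : j < 256 := by
    have h1 := Floor1.partitions_lt v.mem (slot64 e v 0x18)
    have h2 := h.j_lt
    omega
  refine ⟨⟨⟨?frame, ?slot_f, ?slot_len, ?slot_m, ?slot_ls, ?slot_rs, ?slot_n, ?slot_n2, ?slot_sb, ?arg_re, ?arg_left,
    ?left_val⟩, hrbp, hr14, ?g, ?slot_j, ?j_lt, ?slot_pclass, ?slot_cdim, ?k_le, ?slot_cbits, ?slot_csub, ?slot_offset,
    ?slot_i, ?i_lt, ?slot_finalY, ?slot_map⟩, hcf.codebooks, hcf.codebook_count, ecd⟩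
  case frame =>
    refine ⟨h.entry, h.pre, hrsp, hcode, habi, ?_, ?_, ?_, ?_, ?_, ?_, ?_, ?_, ?_, hinv'⟩
    · -- the function's footprint so far
      apply h.same.step_same hs
      intro w hw a h1 h2
      apply covered_footprint
      simp only [List.mem_cons, List.mem_nil_iff, or_false] at hw
      rcases hw with rfl | rfl | rfl | rfl | rfl | rfl | rfl
      · left
        simp only [] at h1 h2
        omega
      · right; left
        exact ⟨⟨fOf e + 48, fOf e + 56⟩, by simp only [holes, List.mem_cons, true_or], h1, h2⟩
      · right; left
        refine ⟨⟨fOf e + 80, fOf e + 112⟩, by simp only [holes, List.mem_cons, true_or, or_true], ?_, ?_⟩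
        · simp only [] at h1 ⊢
          omega
        · simp only [] at h2 ⊢
          omega
      · right; left
        refine ⟨⟨fOf e + 132, fOf e + 144⟩, by simp only [holes, List.mem_cons, true_or, or_true], ?_, ?_⟩
        · simp only [] at h1 ⊢
          omega
        · simp only [] at h2 ⊢
          omega
      · right; left
        refine ⟨⟨fOf e + 1480, fOf e + 1808⟩, by simp only [holes, List.mem_cons, List.mem_nil_iff, true_or, or_true], ?_, ?_⟩
        · simp only [] at h1 ⊢
          omega
        · simp only [] at h2 ⊢
          omega
      · right; left
        refine ⟨⟨fOf e + 1480, fOf e + 1808⟩, by simp only [holes, List.mem_cons, List.mem_nil_iff, true_or, or_true], ?_, ?_⟩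
        · simp only [] at h1 ⊢
          omega
        · simp only [] at h2 ⊢
          omega
      · right; right; left
        refine ⟨i, ?_, ?_, ?_⟩
        · unfold nchan
          omega
        · rw [← ey0]
          exact h1
        · rw [← ey0]
          exact h2
    · rw [keep _ 8 (by u_omega) (by u_omega)]
      exact h.ra
    · rw [keep _ 8 (by u_omega) (by u_omega)]
      exact h.s_r15
    · rw [keep _ 8 (by u_omega) (by u_omega)]
      exact h.s_r14
    · rw [keep _ 8 (by u_omega) (by u_omega)]
      exact h.s_r13
    · rw [keep _ 8 (by u_omega) (by u_omega)]
      exact h.s_r12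
    · rw [keep _ 8 (by u_omega) (by u_omega)]
      exact h.s_rbp
    · rw [keep _ 8 (by u_omega) (by u_omega)]
      exact h.s_rbx
    · -- the shadow layer: no window meets the shadow
      apply h.shadow.untouched
      apply hs.eqOn
      intro w hw
      have hins := hok.inside _ hinv.ob1
      have hyins := hok.inside _ hyb
      simp only [vblock, voff] at hins hyins
      simp only [List.mem_cons, List.mem_nil_iff, or_false] at hw
      rcases hw with rfl | rfl | rfl | rfl | rfl | rfl | rfl <;> simp only [] <;> omega
  case slot_f =>
    have e1 : slot64 e s 0x40 = slot64 e v 0x40 := keep _ 8 (by u_omega) (by u_omega)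
    rw [e1]
    exact h.slot_f
  case slot_len =>
    have e1 : slot64 e s 0x68 = slot64 e v 0x68 := keep _ 8 (by u_omega) (by u_omega)
    rw [e1]
    exact h.slot_len
  case slot_m =>
    have e1 : slot64 e s 0x70 = slot64 e v 0x70 := keep _ 8 (by u_omega) (by u_omega)
    rw [e1]
    exact h.slot_m
  case slot_ls =>
    have e1 : slot32 e s 0x78 = slot32 e v 0x78 := keep _ 4 (by u_omega) (by u_omega)
    rw [e1]
    exact h.slot_ls
  case slot_rs =>
    have e1 : slot32 e s 0x7c = slot32 e v 0x7c := keep _ 4 (by u_omega) (by u_omega)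
    rw [e1]
    exact h.slot_rs
  case slot_n =>
    have e1 : slot32 e s 0x50 = slot32 e v 0x50 := keep _ 4 (by u_omega) (by u_omega)
    rw [e1, hm, hcf.nOf, ← hm]
    exact h.slot_n
  case slot_n2 =>
    have e1 : slot32 e s 0x3c = slot32 e v 0x3c := keep _ 4 (by u_omega) (by u_omega)
    rw [e1, hm, hcf.nOf, ← hm]
    exact h.slot_n2
  case slot_sb =>
    have e1 : slot64 e s 0x60 = slot64 e v 0x60 := keep _ 8 (by u_omega) (by u_omega)
    rw [e1]
    exact h.slot_sb
  case arg_re =>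
    rw [keep _ 4 (by u_omega) (by u_omega)]
    exact h.arg_re
  case arg_left =>
    rw [keep _ 8 (by u_omega) (by u_omega)]
    exact h.arg_left
  case left_val =>
    have hlw := hargs.left_obj.1.where_ hsh.inv hsh.offText (by decide)
    have hl1 := hargs.left_obj.2
    have ea : (addr (pLeftOf e)).toNat = pLeftOf e := toNat_addr _ (by omega)
    have e1 : s.mem.i32 (pLeftOf e) = v.mem.i32 (pLeftOf e) := by
      unfold Mem.i32 Mem.u32
      rw [keep (addr (pLeftOf e)) 4 (by omega) (by omega)]
    rw [e1]
    exact h.left_val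
  case g =>
    rw [eg]
    exact hcf.isFloor
  case slot_j =>
    have e1 : slot32 e s 0x48 = slot32 e v 0x48 := keep _ 4 (by u_omega) (by u_omega)
    rw [e1]
    exact h.slot_j
  case j_lt =>
    rw [eg, Floor1.same_partitions hfk.same hfk.inside]
    exact h.j_lt
  case slot_pclass =>
    rw [epc, eg, Floor1.same_partition_class_list hfk.same hfk.inside j hj256]
    exact h.slot_pclass
  case slot_cdim =>
    rw [ecd, epc, eg, Floor1.same_class_dimensions hfk.same hfk.inside _ (by rw [h.slot_pclass]; exact hpl)]
    exact h.slot_cdim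
  case k_le =>
    rw [ecd]
    exact hk'
  case slot_cbits =>
    rw [ecb, epc, eg, Floor1.same_class_subclasses hfk.same hfk.inside _ (by rw [h.slot_pclass]; exact hpl)]
    exact h.slot_cbits
  case slot_csub =>
    have e1 : slot32 e s 0x30 = slot32 e v 0x30 := keep _ 4 (by u_omega) (by u_omega)
    rw [e1, ecb]
    exact h.slot_csub
  case slot_offset =>
    rw [hoff, eg, Floor1.same_dimSum hfk.same hfk.inside j (by omega)]
  case slot_i =>
    have e1 : slot32 e s 0x54 = slot32 e v 0x54 := keep _ 4 (by u_omega) (by u_omega)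
    rw [e1]
    exact h.slot_i
  case i_lt =>
    rw [hcf.channels]
    exact hi
  case slot_finalY =>
    have e1 : slot64 e s 0x20 = slot64 e v 0x20 := keep _ 8 (by u_omega) (by u_omega)
    rw [e1, hcf.finalY]
    exact h.slot_finalY
  case slot_map =>
    have e1 : slot64 e s 0x58 = slot64 e v 0x58 := keep _ 8 (by u_omega) (by u_omega)
    rw [e1, hm, hcf.mapOf, ← hm]
    exact h.slot_map

/-- `Loop4.step'` without the extras. -/
theorem Loop4.step {u₀ : State} {others : List Obj} {frames : List (Nat × FrameLayout)} {len : Nat} {Ar : Arena}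
    {stored room : Int} {mode : Nat} {ysz : Nat → Nat} {e : State} {ret : Word} {i j k k' : Nat} {v s : State}
    (h : Loop4 u₀ others frames len Ar stored room mode ysz e ret i j k v)
    (he_room : 0x700000 + 3856 ≤ (e.reg .rsp).toNat) (he_top : (e.reg .rsp).toNat + 8 ≤ 0x800000)
    (hrsp : s.reg .rsp = spOf e) (hcode : Vorbis.CodeOK u₀ s.mem) (habi : abiInv s)
    (hrbp : (s.reg .rbp).toNat = fOf e) (hr14 : s.reg .r14 = UInt64.ofNat k') (hk' : k' ≤ slot32 e v 0x10)
    (hs : Mem.SameExcept [⟨(e.reg .rsp).toNat - 3856, (e.reg .rsp).toNat - 3000 + 12⟩,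
      ⟨fOf e + 48, fOf e + 56⟩, ⟨fOf e + 84, fOf e + 96⟩, ⟨fOf e + 136, fOf e + 144⟩, ⟨fOf e + 1484, fOf e + 1749⟩,
      ⟨fOf e + 1752, fOf e + 1784⟩,
      ⟨stb_vorbis.finalY v.mem (fOf e) i, stb_vorbis.finalY v.mem (fOf e) i + ysz i⟩] v.mem s.mem)
    (hoff : slot32 e s 0x8 = 2 + Floor1.dimSum v.mem (slot64 e v 0x18) j + k')
    (hb : Bits (RunBlk Ar len) len s.mem (fOf e)) :
    Loop4 u₀ others frames len Ar stored room mode ysz e ret i j k' s :=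
  (h.step' he_room he_top hrsp hcode habi hrbp hr14 hk' hs hoff hb).1

/-- **`Loop4` after stores BELOW THE STEADY STACK POINTER only** (the return addresses of check calls): nothing of the round changed. -/
theorem Loop4.stackOnly' {u₀ : State} {others : List Obj} {frames : List (Nat × FrameLayout)} {len : Nat} {Ar : Arena}
    {stored room : Int} {mode : Nat} {ysz : Nat → Nat} {e : State} {ret : Word} {i j k : Nat} {v s : State}
    (h : Loop4 u₀ others frames len Ar stored room mode ysz e ret i j k v)
    (he_room : 0x700000 + 3856 ≤ (e.reg .rsp).toNat) (he_top : (e.reg .rsp).toNat + 8 ≤ 0x800000)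
    (hrsp : s.reg .rsp = spOf e) (hcode : Vorbis.CodeOK u₀ s.mem) (habi : abiInv s)
    (hrbp : s.reg .rbp = v.reg .rbp) (hr14 : s.reg .r14 = v.reg .r14)
    (hs : Mem.SameExcept [⟨(e.reg .rsp).toNat - 3856, (e.reg .rsp).toNat - 3000⟩] v.mem s.mem) :
    Loop4 u₀ others frames len Ar stored room mode ysz e ret i j k s ∧
      stb_vorbis.codebooks s.mem (fOf e) = stb_vorbis.codebooks v.mem (fOf e) ∧
      stb_vorbis.codebook_count s.mem (fOf e) = stb_vorbis.codebook_count v.mem (fOf e) ∧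
      slot32 e s 0x10 = slot32 e v 0x10 := by
  have hfoff := h.inv.objOff
  simp only [voff] at hfoff
  have hb : Bits (RunBlk Ar len) len s.mem (fOf e) :=
    Reader.bits_of_window h.inv.fb.vorbis.bits hs (by omega)
  apply h.step' he_room he_top hrsp hcode habi (by rw [hrbp]; exact h.rbp) (by rw [hr14]; exact h.r14) h.k_le
    _ _ hb
  · apply hs.mono
    intro w hw a h1 h2
    have e1 : w = ⟨(e.reg .rsp).toNat - 3856, (e.reg .rsp).toNat - 3000⟩ := List.mem_singleton.mp hw
    subst e1
    refine ⟨_, List.mem_cons_self, ?_, ?_⟩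
    · exact h1
    · simp only [] at h2 ⊢
      omega
  · have e1 : slot32 e s 0x8 = slot32 e v 0x8 := by
      apply hs.readLE _ 4 (by u_omega)
      intro w hw
      have e1 : w = ⟨(e.reg .rsp).toNat - 3856, (e.reg .rsp).toNat - 3000⟩ := List.mem_singleton.mp hw
      subst e1
      simp only []
      u_omega
    rw [e1]
    exact h.slot_offset


/-- `Loop4.stackOnly'` without the extras. -/
theorem Loop4.stackOnly {u₀ : State} {others : List Obj} {frames : List (Nat × FrameLayout)} {len : Nat} {Ar : Arena}
    {stored room : Int} {mode : Nat} {ysz : Nat → Nat} {e : State} {ret : Word} {i j k : Nat} {v s : State}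
    (h : Loop4 u₀ others frames len Ar stored room mode ysz e ret i j k v)
    (he_room : 0x700000 + 3856 ≤ (e.reg .rsp).toNat) (he_top : (e.reg .rsp).toNat + 8 ≤ 0x800000)
    (hrsp : s.reg .rsp = spOf e) (hcode : Vorbis.CodeOK u₀ s.mem) (habi : abiInv s)
    (hrbp : s.reg .rbp = v.reg .rbp) (hr14 : s.reg .r14 = v.reg .r14)
    (hs : Mem.SameExcept [⟨(e.reg .rsp).toNat - 3856, (e.reg .rsp).toNat - 3000⟩] v.mem s.mem) :
    Loop4 u₀ others frames len Ar stored room mode ysz e ret i j k s :=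
  (h.stackOnly' he_room he_top hrsp hcode habi hrbp hr14 hs).1

/-- The slot `[rsp + 0x10] = cdim` over stores below the steady stack pointer. -/
theorem cdim_keep_stack {e v s : State} (he_room : 0x700000 + 3856 ≤ (e.reg .rsp).toNat)
    (he_top : (e.reg .rsp).toNat + 8 ≤ 0x800000)
    (hs : Mem.SameExcept [⟨(e.reg .rsp).toNat - 3856, (e.reg .rsp).toNat - 3000⟩] v.mem s.mem) :
    slot32 e s 0x10 = slot32 e v 0x10 := by
  apply hs.readLE _ 4 (by u_omega)
  intro w hw
  have e1 : w = ⟨(e.reg .rsp).toNat - 3856, (e.reg .rsp).toNat - 3000⟩ := List.mem_singleton.mp hw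
  subst e1
  simp only []
  u_omega

/-! ### The exit assertion of the segment, from the loop invariant -/

/-- **THE EXIT ASSERTION OF THE SEGMENT, from the loop invariant with `k = cdim`**: the only store since the loop head is the
increment of the slot `[rsp + 0x48] = j`; `r15 = g`. `offset = 2 + Σ_{j' < j} + cdim = 2 + Σ_{j' ≤ j}` (`Floor1.dimSum_succ`). -/
theorem Loop4.exit_at3 {u₀ : State} {others : List Obj} {frames : List (Nat × FrameLayout)} {len : Nat} {Ar : Arena}
    {stored room : Int} {mode : Nat} {ysz : Nat → Nat} {e : State} {ret : Word} {i j k : Nat} {v s : State}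
    (h : Loop4 u₀ others frames len Ar stored room mode ysz e ret i j k v)
    (he_room : 0x700000 + 3856 ≤ (e.reg .rsp).toNat) (he_top : (e.reg .rsp).toNat + 8 ≤ 0x800000)
    (hk : k = slot32 e v 0x10)
    (hrip : s.rip = Vorbis.L.vorbis_decode_packet_rest.cut8)
    (hrsp : s.reg .rsp = spOf e) (hcode : Vorbis.CodeOK u₀ s.mem) (habi : abiInv s)
    (hrbp : (s.reg .rbp).toNat = fOf e) (hr15 : (s.reg .r15).toNat = slot64 e v 0x18)
    (hs : Mem.SameExcept [⟨(e.reg .rsp).toNat - 3000 + 0x48, (e.reg .rsp).toNat - 3000 + 0x4c⟩] v.mem s.mem)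
    (hj : slot32 e s 0x48 = j + 1) :
    At3 u₀ others frames len Ar stored room mode ysz e ret i (j + 1) s := by
  obtain ⟨hsh, hinv0, hargs⟩ := h.pre
  have hargs_in : (e.reg .rsp).toNat + 24 ≤ 0x800000 := hargs.args_top
  have hinv := h.inv
  have hi := h.i_lt
  have hok := hinv.ok
  have hfoff := hinv.objOff
  simp only [voff] at hfoff
  have hb : Bits (RunBlk Ar len) len s.mem (fOf e) :=
    Reader.bits_of_window hinv.fb.vorbis.bits hs (by omega)
  -- the invariant: the store is a stack store
  have hs7 : Mem.SameExcept [⟨(e.reg .rsp).toNat - 3000 + 0x48, (e.reg .rsp).toNat - 3000 + 0x4c⟩,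
      ⟨fOf e + 48, fOf e + 56⟩, ⟨fOf e + 84, fOf e + 96⟩, ⟨fOf e + 136, fOf e + 144⟩, ⟨fOf e + 1484, fOf e + 1749⟩,
      ⟨fOf e + 1752, fOf e + 1784⟩,
      ⟨stb_vorbis.finalY v.mem (fOf e) i, stb_vorbis.finalY v.mem (fOf e) i + ysz i⟩] v.mem s.mem := by
    apply hs.mono
    intro w hw a h1 h2
    have e1 : w = ⟨(e.reg .rsp).toNat - 3000 + 0x48, (e.reg .rsp).toNat - 3000 + 0x4c⟩ := List.mem_singleton.mp hw
    subst e1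
    exact ⟨_, List.mem_cons_self, h1, h2⟩
  have hinv' := round4_inv hinv hi (by omega) (by omega) hs7 hb
  -- the configuration at the loop head reads as at the function's entry
  have hd0 : DecodeSame (fOf e) e.mem v.mem :=
    StoreOK.decodeSame hinv0.ok hinv0.ob1 hinv0.sep h.same (fun w hw => footprint_storeOK h.pre he_room w hw)
  have he0 : ObjEq ConfigOK.wins e.mem (fOf e) v.mem (fOf e) := hd0.sub ConfigOK.wins_decode
  have hmode : (mode : Int) < stb_vorbis.mode_count v.mem (fOf e) := by
    have e1 : stb_vorbis.mode_count v.mem (fOf e) = stb_vorbis.mode_count e.mem (fOf e) := by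
      simp only [vacc, voff]
      exact he0.i32 480 (by decide)
    rw [e1]
    exact hargs.mode_lt
  have hw : ∀ w, w ∈ [(⟨(e.reg .rsp).toNat - 3000 + 0x48, (e.reg .rsp).toNat - 3000 + 0x4c⟩ : Span)] →
      StoreOK (RunBlk Ar len) v.mem (fOf e) w := by
    intro w hsp
    have e1 : w = ⟨(e.reg .rsp).toNat - 3000 + 0x48, (e.reg .rsp).toNat - 3000 + 0x4c⟩ := List.mem_singleton.mp hsp
    subst e1
    apply StoreOK.off
    intro B hB
    have := hinv.offStack B hB
    simp only []
    omega
  have hcf := cfgEq4_of_stores (mode := mode) hinv hi h.g hmode hs hw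
  -- every other read of the stack region is kept
  have keep : ∀ (a : Word) (n : Nat), a.toNat + n < 2 ^ 64 →
      (a.toNat + n ≤ (e.reg .rsp).toNat - 3000 + 0x48 ∨ (e.reg .rsp).toNat - 3000 + 0x4c ≤ a.toNat) →
      s.mem.readLE a n = v.mem.readLE a n := by
    intro a n h1 h2
    apply hs.readLE a n h1
    intro w hw'
    have e1 : w = ⟨(e.reg .rsp).toNat - 3000 + 0x48, (e.reg .rsp).toNat - 3000 + 0x4c⟩ := List.mem_singleton.mp hw'
    subst e1
    simp only []
    omega
  have hm : mOf e = stb_vorbis.mode_config_at (fOf e) mode := hargs.m_eq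
  have hfk := hcf.floor
  have hfl := hinv.config.floor.floor h.g
  have hj256 : j < 256 := by
    have h1 := Floor1.partitions_lt v.mem (slot64 e v 0x18)
    have h2 := h.j_lt
    omega
  refine ⟨⟨?frame, ?slot_f, ?slot_len, ?slot_m, ?slot_ls, ?slot_rs, ?slot_n, ?slot_n2, ?slot_sb, ?arg_re, ?arg_left,
    ?left_val⟩, hrip, ?g, hrbp, hj, ?j_le, ?slot_offset, ?slot_i, ?i_lt, ?slot_finalY, ?slot_map⟩
  case frame =>
    refine ⟨h.entry, h.pre, hrsp, hcode, habi, ?_, ?_, ?_, ?_, ?_, ?_, ?_, ?_, ?_, hinv'⟩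
    · apply h.same.step_same hs
      intro w hw' a h1 h2
      apply covered_footprint
      have e1 : w = ⟨(e.reg .rsp).toNat - 3000 + 0x48, (e.reg .rsp).toNat - 3000 + 0x4c⟩ := List.mem_singleton.mp hw'
      subst e1
      left
      simp only [] at h1 h2
      omega
    · rw [keep _ 8 (by u_omega) (by u_omega)]
      exact h.ra
    · rw [keep _ 8 (by u_omega) (by u_omega)]
      exact h.s_r15
    · rw [keep _ 8 (by u_omega) (by u_omega)]
      exact h.s_r14
    · rw [keep _ 8 (by u_omega) (by u_omega)]
      exact h.s_r13
    · rw [keep _ 8 (by u_omega) (by u_omega)]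
      exact h.s_r12
    · rw [keep _ 8 (by u_omega) (by u_omega)]
      exact h.s_rbp
    · rw [keep _ 8 (by u_omega) (by u_omega)]
      exact h.s_rbx
    · apply h.shadow.untouched
      apply hs.eqOn
      intro w hw'
      have e1 : w = ⟨(e.reg .rsp).toNat - 3000 + 0x48, (e.reg .rsp).toNat - 3000 + 0x4c⟩ := List.mem_singleton.mp hw'
      subst e1
      simp only []
      omega
  case slot_f =>
    have e1 : slot64 e s 0x40 = slot64 e v 0x40 := keep _ 8 (by u_omega) (by u_omega)
    rw [e1]
    exact h.slot_f
  case slot_len =>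
    have e1 : slot64 e s 0x68 = slot64 e v 0x68 := keep _ 8 (by u_omega) (by u_omega)
    rw [e1]
    exact h.slot_len
  case slot_m =>
    have e1 : slot64 e s 0x70 = slot64 e v 0x70 := keep _ 8 (by u_omega) (by u_omega)
    rw [e1]
    exact h.slot_m
  case slot_ls =>
    have e1 : slot32 e s 0x78 = slot32 e v 0x78 := keep _ 4 (by u_omega) (by u_omega)
    rw [e1]
    exact h.slot_ls
  case slot_rs =>
    have e1 : slot32 e s 0x7c = slot32 e v 0x7c := keep _ 4 (by u_omega) (by u_omega)
    rw [e1]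
    exact h.slot_rs
  case slot_n =>
    have e1 : slot32 e s 0x50 = slot32 e v 0x50 := keep _ 4 (by u_omega) (by u_omega)
    rw [e1, hm, hcf.nOf, ← hm]
    exact h.slot_n
  case slot_n2 =>
    have e1 : slot32 e s 0x3c = slot32 e v 0x3c := keep _ 4 (by u_omega) (by u_omega)
    rw [e1, hm, hcf.nOf, ← hm]
    exact h.slot_n2
  case slot_sb =>
    have e1 : slot64 e s 0x60 = slot64 e v 0x60 := keep _ 8 (by u_omega) (by u_omega)
    rw [e1]
    exact h.slot_sb
  case arg_re =>
    rw [keep _ 4 (by u_omega) (by u_omega)]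
    exact h.arg_re
  case arg_left =>
    rw [keep _ 8 (by u_omega) (by u_omega)]
    exact h.arg_left
  case left_val =>
    have hlw := hargs.left_obj.1.where_ hsh.inv hsh.offText (by decide)
    have hl1 := hargs.left_obj.2
    have ea : (addr (pLeftOf e)).toNat = pLeftOf e := toNat_addr _ (by omega)
    have e1 : s.mem.i32 (pLeftOf e) = v.mem.i32 (pLeftOf e) := by
      unfold Mem.i32 Mem.u32
      rw [keep (addr (pLeftOf e)) 4 (by omega) (by omega)]
    rw [e1]
    exact h.left_val
  case g =>
    rw [hr15]
    exact hcf.isFloor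
  case j_le =>
    rw [hr15, Floor1.same_partitions hfk.same hfk.inside]
    have := h.j_lt
    omega
  case slot_offset =>
    have e1 : slot32 e s 0x8 = slot32 e v 0x8 := keep _ 4 (by u_omega) (by u_omega)
    rw [e1, hr15, Floor1.same_dimSum hfk.same hfk.inside (j + 1) (by omega), Floor1.dimSum_succ, h.slot_offset, hk,
      h.slot_cdim, h.slot_pclass]
    omega
  case slot_i =>
    have e1 : slot32 e s 0x54 = slot32 e v 0x54 := keep _ 4 (by u_omega) (by u_omega)
    rw [e1]
    exact h.slot_i
  case i_lt =>
    rw [hcf.channels]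
    exact hi
  case slot_finalY =>
    have e1 : slot64 e s 0x20 = slot64 e v 0x20 := keep _ 8 (by u_omega) (by u_omega)
    rw [e1, hcf.finalY]
    exact h.slot_finalY
  case slot_map =>
    have e1 : slot64 e s 0x58 = slot64 e v 0x58 := keep _ 8 (by u_omega) (by u_omega)
    rw [e1, hm, hcf.mapOf, ← hm]
    exact h.slot_map

end Vorbis.Spec.vorbis_decode_packet_rest
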